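-- pv_equiv track=rewrite | github.com/samuellin01/osworld-dag-scheduler | scripts/python/run_batch_osworld_scheduler.py | find_next_trial_slots
-- ===== SOURCE A (Python) =====
-- def find_next_trial_slots(existing_trials: list[int], num_new: int) -> list[int]:
--     if not existing_trials:
--         return list(range(1, num_new + 1))
--     slots, candidate, existing_set = [], 1, set(existing_trials)
--     while len(slots) < num_new:
--         if candidate not in existing_set:
--             slots.append(candidate)
--         candidate += 1
--     return slots
-- ===== SOURCE B (Python) =====
-- def find_next_trial_slots(existing_trials: list[int], num_new: int) -> list[int]:
--     # Gap-scan over the sorted, deduplicated positive existing values: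
--     # emit whole runs of free slots at once instead of testing each candidate.
--     out = []
--     cand = 1
--     for v in sorted({v for v in existing_trials if v >= 1}):
--         need = num_new - len(out)
--         if need <= 0:
--             break
--         out.extend(range(cand, min(v, cand + need)))
--         cand = v + 1
--     need = num_new - len(out)
--     if need > 0:
--         out.extend(range(cand, cand + need))
--     return out
-- ===== Notes on version B (the rewrite author's own statement) =====
-- stated objective: alternative
-- what changed: Replaced the per-candidate set-membership while-loop with a single gap-scanning pass over the sorted deduplicated positive existing values, emitting whole runs of free slots as range batches.
import Mathlib
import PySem

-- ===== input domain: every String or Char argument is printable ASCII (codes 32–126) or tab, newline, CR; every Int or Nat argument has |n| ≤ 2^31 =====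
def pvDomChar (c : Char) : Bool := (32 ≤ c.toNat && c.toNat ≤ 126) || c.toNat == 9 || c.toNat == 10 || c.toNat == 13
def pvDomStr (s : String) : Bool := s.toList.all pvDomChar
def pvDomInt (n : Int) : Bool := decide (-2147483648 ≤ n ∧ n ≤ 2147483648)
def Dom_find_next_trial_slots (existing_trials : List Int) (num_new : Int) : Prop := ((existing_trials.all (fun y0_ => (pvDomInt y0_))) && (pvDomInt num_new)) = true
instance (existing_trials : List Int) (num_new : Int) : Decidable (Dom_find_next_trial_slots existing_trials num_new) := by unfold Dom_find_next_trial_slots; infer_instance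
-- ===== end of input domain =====

-- B replaces A's per-candidate set-membership loop with one gap-scanning pass
-- over the sorted deduplicated positive existing values (objective: alternative).

-- ===== PORT A =====
-- termination helpers for the while-loop (cited by pvALoop's decreasing_by)
theorem pvFilterMono (t : List Int) (c d : Int) (h : c ≤ d) :
    (t.filter (fun x => decide (d ≤ x))).length ≤ (t.filter (fun x => decide (c ≤ x))).length := by
  induction t with
  | nil => simp
  | cons a t ih =>
    simp only [List.filter_cons]
    by_cases h1 : d ≤ a
    · rw [if_pos (by simpa using h1), if_pos (by simpa using h.trans h1)]
      simp only [List.length_cons]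
      omega
    · rw [if_neg (by simpa using h1)]
      by_cases h2 : c ≤ a
      · rw [if_pos (by simpa using h2)]
        simp only [List.length_cons]
        omega
      · rw [if_neg (by simpa using h2)]
        exact ih

theorem pvFilterLenLt (t : List Int) (c d : Int) (hcd : c < d) (hc : c ∈ t) :
    (t.filter (fun x => decide (d ≤ x))).length < (t.filter (fun x => decide (c ≤ x))).length := by
  induction t with
  | nil => cases hc
  | cons a t ih =>
    simp only [List.filter_cons]
    rcases List.mem_cons.mp hc with rfl | hct
    · rw [if_neg (by simp; omega), if_pos (by simp)]
      have := pvFilterMono t c d (le_of_lt hcd)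
      simp only [List.length_cons]
      omega
    · by_cases h1 : d ≤ a
      · rw [if_pos (by simpa using h1), if_pos (by simp; omega)]
        have := ih hct
        simp only [List.length_cons]
        omega
      · rw [if_neg (by simpa using h1)]
        by_cases h2 : c ≤ a
        · rw [if_pos (by simpa using h2)]
          have := ih hct
          simp only [List.length_cons]
          omega
        · rw [if_neg (by simpa using h2)]
          exact ih hct

-- the 'while len(slots) < num_new' loop of A, step for step
def pvALoop (existing_set : PySem.Set Int) (num_new : Int) (slots : List Int) (candidate : Int) : List Int :=
  if PySem.List.len slots < num_new then
    if candidate ∈ existing_set then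
      pvALoop existing_set num_new slots (candidate + 1)
    else
      pvALoop existing_set num_new (slots ++ [candidate]) (candidate + 1)
  else slots
termination_by (num_new - slots.length).toNat + (existing_set.filter (fun x => decide (candidate ≤ x))).length
decreasing_by
  · have h1 := pvFilterLenLt existing_set candidate (candidate + 1) (by omega) (by assumption)
    omega
  · have hlt : PySem.List.len slots < num_new := by assumption
    rw [PySem.List.len_eq] at hlt
    have h1 := pvFilterMono existing_set candidate (candidate + 1) (by omega)
    simp only [List.length_append, List.length_cons, List.length_nil]
    omega

def find_next_trial_slots (existing_trials : List Int) (num_new : Int) : List Int :=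
  if existing_trials = [] then
    PySem.List.pyRange 1 (num_new + 1) 1
  else
    pvALoop (PySem.Set.ofList existing_trials) num_new [] 1

-- ===== PORT B =====
-- the 'for v in sorted({...})' loop of B plus the trailing fill, step for step
def pvBLoop (num_new : Int) (out : List Int) (cand : Int) : List Int → List Int
  | [] =>
      let need := num_new - PySem.List.len out
      if 0 < need then out ++ PySem.List.pyRange cand (cand + need) 1 else out
  | v :: vs =>
      let need := num_new - PySem.List.len out
      if need ≤ 0 then out
      else pvBLoop num_new (out ++ PySem.List.pyRange cand (min v (cand + need)) 1) (v + 1) vs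

def find_next_trial_slots_alt (existing_trials : List Int) (num_new : Int) : List Int :=
  pvBLoop num_new [] 1
    (PySem.List.sorted (PySem.Set.ofList (existing_trials.filter (fun v => decide (1 ≤ v)))) (fun x => x) false)

-- ===== PRECONDITION & SPEC =====
def Spec_find_next_trial_slots (existing_trials : List Int) (num_new : Int) (out : List Int) : Prop := out = find_next_trial_slots_alt existing_trials num_new
instance (existing_trials : List Int) (num_new : Int) (out : List Int) : Decidable (Spec_find_next_trial_slots existing_trials num_new out) := by unfold Spec_find_next_trial_slots; infer_instance

-- ===== CLAIM (what is proved, stated in full; the proofs are below) =====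
def Claim_equal_find_next_trial_slots : Prop := ∀ (existing_trials : List Int) (num_new : Int), Dom_find_next_trial_slots existing_trials num_new → Spec_find_next_trial_slots existing_trials num_new (find_next_trial_slots existing_trials num_new)

-- ===== LEMMAS AND PROOFS =====

-- reference function: the first k integers ≥ c that are not in S, in increasing order
def pvCollect (S : List Int) (c : Int) (k : Nat) : List Int :=
  if k = 0 then []
  else if c ∈ S then pvCollect S (c + 1) k
  else c :: pvCollect S (c + 1) (k - 1)
termination_by k + (S.filter (fun x => decide (c ≤ x))).length
decreasing_by
  · have h1 := pvFilterLenLt S c (c + 1) (by omega) (by assumption)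
    omega
  · have h1 := pvFilterMono S c (c + 1) (by omega)
    omega

theorem pvCollect_zero (S : List Int) (c : Int) : pvCollect S c 0 = [] := by
  rw [pvCollect]
  simp

theorem pvCollect_mem (S : List Int) (c : Int) (k : Nat) (hk : k ≠ 0) (hmem : c ∈ S) :
    pvCollect S c k = pvCollect S (c + 1) k := by
  rw [pvCollect, if_neg hk, if_pos hmem]

theorem pvCollect_not_mem (S : List Int) (c : Int) (k : Nat) (hk : k ≠ 0) (hmem : c ∉ S) :
    pvCollect S c k = c :: pvCollect S (c + 1) (k - 1) := by
  rw [pvCollect, if_neg hk, if_neg hmem]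

-- A's while-loop produces pvCollect
theorem pvALoop_eq_collect (S : List Int) (n : Int) (slots : List Int) (c : Int) :
    pvALoop S n slots c = slots ++ pvCollect S c (n - slots.length).toNat := by
  fun_induction pvALoop S n slots c with
  | case1 slots c hlt hmem ih =>
    rw [ih, PySem.List.len_eq] at *
    have hk : (n - (slots.length : Int)).toNat ≠ 0 := by omega
    rw [pvCollect_mem S c _ hk hmem]
  | case2 slots c hlt hmem ih =>
    rw [ih, PySem.List.len_eq] at *
    have hk : (n - (slots.length : Int)).toNat ≠ 0 := by omega
    rw [pvCollect_not_mem S c _ hk hmem]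
    have harith : (n - ((slots ++ [c]).length : Int)).toNat = (n - slots.length).toNat - 1 := by
      simp only [List.length_append, List.length_cons, List.length_nil]
      push_cast
      omega
    rw [harith, List.append_assoc, List.singleton_append]
  | case3 slots c hlt =>
    rw [PySem.List.len_eq] at hlt
    have hk : (n - (slots.length : Int)).toNat = 0 := by omega
    rw [hk, pvCollect_zero]
    simp

-- with no member of S at or above c, pvCollect is a plain range
theorem pvCollect_free (S : List Int) (c : Int) (k : Nat)
    (h : ∀ x, c ≤ x → x ∉ S) :
    pvCollect S c k = PySem.List.pyRange c (c + k) 1 := by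
  induction k generalizing c with
  | zero =>
    rw [pvCollect_zero, PySem.List.pyRange_one_eq_nil (by push_cast; omega)]
  | succ k ih =>
    have hc : c ∉ S := h c le_rfl
    rw [pvCollect_not_mem S c _ (Nat.succ_ne_zero k) hc]
    simp only [Nat.succ_sub_one]
    rw [PySem.List.pyRange_one_cons (show c < c + ((k + 1 : Nat) : Int) by push_cast; omega)]
    have heq : c + ((k + 1 : Nat) : Int) = (c + 1) + (k : Nat) := by push_cast; ring
    rw [heq, ih (c + 1) (fun x hx => h x (by omega))]

-- crossing the next existing value v: pvCollect emits the gap below v as a range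
theorem pvCollect_gap (S : List Int) (v c : Int) (k : Nat)
    (hcv : c ≤ v) (hvS : v ∈ S)
    (hfree : ∀ x, c ≤ x → x < v → x ∉ S) :
    pvCollect S c k =
      PySem.List.pyRange c (min v (c + k)) 1 ++
        pvCollect S (v + 1) (k - (min v (c + k) - c).toNat) := by
  induction k generalizing c with
  | zero =>
    have hm : min v (c + ((0 : Nat) : Int)) = c := by push_cast; omega
    rw [hm, PySem.List.pyRange_one_eq_nil le_rfl, pvCollect_zero]
    rw [show (0 - ((c : Int) - c).toNat) = 0 from by omega, pvCollect_zero]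
    simp
  | succ k ih =>
    by_cases hc : c = v
    · subst hc
      have hm : min c (c + ((k + 1 : Nat) : Int)) = c := by push_cast; omega
      rw [hm, PySem.List.pyRange_one_eq_nil le_rfl,
        pvCollect_mem S c _ (Nat.succ_ne_zero k) hvS]
      rw [show ((k + 1) - ((c : Int) - c).toNat) = k + 1 from by omega]
      simp
    · have hclt : c < v := lt_of_le_of_ne hcv hc
      have hcS : c ∉ S := hfree c le_rfl hclt
      rw [pvCollect_not_mem S c _ (Nat.succ_ne_zero k) hcS]
      simp only [Nat.succ_sub_one]
      have hm1 : c < min v (c + ((k + 1 : Nat) : Int)) := by push_cast; omega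
      rw [PySem.List.pyRange_one_cons hm1]
      rw [ih (c + 1) (by omega) (fun x hx hxv => hfree x (by omega) hxv)]
      have hmeq : min v (c + 1 + (k : Nat)) = min v (c + ((k + 1 : Nat) : Int)) := by
        push_cast; omega
      rw [hmeq]
      have hnat : k - (min v (c + ((k + 1 : Nat) : Int)) - (c + 1)).toNat
          = (k + 1) - (min v (c + ((k + 1 : Nat) : Int)) - c).toNat := by
        push_cast at hm1 ⊢
        omega
      rw [hnat, List.cons_append]

-- B's gap-scanning loop produces pvCollect, given the sorted strictly increasing
-- view vs of S ∩ [c, ∞)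
theorem pvBLoop_eq_collect (S : List Int) (n : Int) :
    ∀ (vs out : List Int) (c : Int),
      vs.Pairwise (· < ·) →
      (∀ x ∈ vs, c ≤ x) →
      (∀ x, c ≤ x → (x ∈ S ↔ x ∈ vs)) →
      pvBLoop n out c vs = out ++ pvCollect S c (n - out.length).toNat := by
  intro vs
  induction vs with
  | nil =>
    intro out c _ _ hiff
    simp only [pvBLoop, PySem.List.len_eq]
    by_cases hpos : 0 < n - (out.length : Int)
    · rw [if_pos hpos]
      rw [pvCollect_free S c _ (fun x hx hxS => by simpa using (hiff x hx).mp hxS)]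
      rw [show (((n - (out.length : Int)).toNat : Int)) = n - out.length from by omega]
    · rw [if_neg hpos]
      rw [show (n - (out.length : Int)).toNat = 0 from by omega, pvCollect_zero]
      simp
  | cons v vs ih =>
    intro out c hsort hge hiff
    simp only [pvBLoop, PySem.List.len_eq]
    by_cases hle : n - (out.length : Int) ≤ 0
    · rw [if_pos hle]
      rw [show (n - (out.length : Int)).toNat = 0 from by omega, pvCollect_zero]
      simp
    · rw [if_neg hle]
      have hcv : c ≤ v := hge v (List.mem_cons_self ..)
      have hvS : v ∈ S := (hiff v hcv).mpr (List.mem_cons_self ..)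
      have hfree : ∀ x, c ≤ x → x < v → x ∉ S := by
        intro x hx hxv hxS
        rcases List.mem_cons.mp ((hiff x hx).mp hxS) with h | h
        · omega
        · have := (List.pairwise_cons.mp hsort).1 x h
          omega
      rw [ih (out ++ PySem.List.pyRange c (min v (c + (n - out.length))) 1) (v + 1)
            (List.pairwise_cons.mp hsort).2
            (fun x hx => by have := (List.pairwise_cons.mp hsort).1 x hx; omega)
            (fun x hx => by
              rw [hiff x (by omega)]
              constructor
              · intro h
                rcases List.mem_cons.mp h with h | h
                · omega
                · exact h
              · intro h
                exact List.mem_cons_of_mem _ h)]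
      rw [pvCollect_gap S v c _ hcv hvS hfree]
      have hneed : (((n - (out.length : Int)).toNat : Int)) = n - out.length := by omega
      rw [List.append_assoc]
      congr 2
      · rw [hneed]
      · congr 1
        simp only [List.length_append, PySem.List.length_pyRange_one]
        push_cast
        omega

-- ===== VERDICT (by name: the statement is the Claim_ definition above) =====
theorem find_next_trial_slots_spec : Claim_equal_find_next_trial_slots := by
  intro existing_trials num_new _
  unfold Spec_find_next_trial_slots
  unfold find_next_trial_slots find_next_trial_slots_alt
  by_cases hnil : existing_trials = []
  · subst hnil
    rw [if_pos rfl]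
    simp only [List.filter_nil]
    rw [show PySem.List.sorted (PySem.Set.ofList ([] : List Int)) (fun x => x) false = [] from rfl]
    simp only [pvBLoop, PySem.List.len_eq, List.length_nil]
    by_cases hpos : 0 < num_new
    · rw [if_pos (by omega)]
      rw [show (1 : Int) + (num_new - (0 : Nat)) = num_new + 1 from by push_cast; ring]
      simp
    · rw [if_neg (by omega)]
      rw [PySem.List.pyRange_one_eq_nil (by omega)]
  · rw [if_neg hnil]
    rw [pvALoop_eq_collect]
    have hmemvs : ∀ x : Int,
        x ∈ PySem.List.sorted
            (PySem.Set.ofList (existing_trials.filter (fun v => decide (1 ≤ v)))) (fun x => x) false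
          ↔ (x ∈ existing_trials ∧ 1 ≤ x) := by
      intro x
      rw [PySem.List.mem_sorted, PySem.Set.mem_ofList, List.mem_filter]
      simp
    rw [pvBLoop_eq_collect (PySem.Set.ofList existing_trials) num_new _ [] 1
        (PySem.List.sorted_ofList_pairwise_lt _)
        (fun x hx => ((hmemvs x).mp hx).2)
        (fun x hx => by
          rw [hmemvs x, PySem.Set.mem_ofList]
          exact ⟨fun h => ⟨h, hx⟩, fun h => h.1⟩)]
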